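-- pv_equiv track=rewrite | github.com/HelioASjunior/CivilEngAI-Calc | app.py | generate_chat_title
-- ===== SOURCE A (Python) =====
-- def generate_chat_title(user_prompt: str) -> str:
--     # Gera titulo curto (max 5 palavras) com base na primeira frase do usuario.
--     first_sentence = user_prompt.strip().split("\n")[0]
--     for separator in [".", "?", "!", ";", ":"]:
--         first_sentence = first_sentence.split(separator)[0]
--
--     words = [w for w in first_sentence.replace(",", " ").split() if w]
--     if not words:
--         return "Nova Conversa"
--
--     short_title = " ".join(words[:5]).strip()
--     return short_title if short_title else "Nova Conversa"
-- ===== SOURCE B (Python) =====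
-- def generate_chat_title(user_prompt: str) -> str:
--     # One-shot: scan the first line's characters once, stopping at the first
--     # sentence separator, instead of five successive split passes.
--     first_line = user_prompt.strip().split("\n")[0]
--     kept = []
--     for ch in first_line:
--         if ch in ".?!;:":
--             break
--         kept.append(ch)
--     words = "".join(kept).replace(",", " ").split()
--     return " ".join(words[:5]) or "Nova Conversa"
-- ===== Notes on version B (the rewrite author's own statement) =====
-- stated objective: simpler
-- what changed: Replaces the five successive split-and-keep-head passes with a single character scan that stops at the first sentence separator, and collapses the word filtering, emptiness checks and final strip into one join-or-default expression (str.split never yields empty words and joined words need no strip).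
import Mathlib
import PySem

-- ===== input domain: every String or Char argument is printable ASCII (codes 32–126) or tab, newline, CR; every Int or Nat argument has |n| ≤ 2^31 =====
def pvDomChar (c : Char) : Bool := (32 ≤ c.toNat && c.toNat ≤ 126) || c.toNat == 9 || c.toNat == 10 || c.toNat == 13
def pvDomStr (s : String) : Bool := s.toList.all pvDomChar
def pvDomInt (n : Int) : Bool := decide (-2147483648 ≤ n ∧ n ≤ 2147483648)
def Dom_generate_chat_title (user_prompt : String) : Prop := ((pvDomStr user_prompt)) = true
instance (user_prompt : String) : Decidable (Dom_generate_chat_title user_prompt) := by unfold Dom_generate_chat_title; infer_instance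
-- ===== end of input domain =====

-- B replaces A's five split-and-keep-head passes by one character scan stopping at the
-- first sentence separator, and collapses A's word filter, emptiness checks and final
-- strip into a single join-or-default expression (objective: simpler).

-- ===== PORT A =====
-- s.split(sep)[0] : splitting on a non-empty separator always yields a non-empty list,
-- so Python's [0] never raises; headD "" is exact here.
def pyHeadSplit (s sep : String) : String := ((PySem.Str.split? s sep).getD []).headD ""

def generate_chat_title (user_prompt : String) : String :=
  let first0 := pyHeadSplit (PySem.Str.strip user_prompt) "\n"
  let first_sentence := [".", "?", "!", ";", ":"].foldl (fun s sep => pyHeadSplit s sep) first0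
  let words := (PySem.Str.split₀ (PySem.Str.replace first_sentence "," " ")).filter (fun w => w != "")
  if words.isEmpty then "Nova Conversa"
  else
    let short_title := PySem.Str.strip (PySem.Str.join " " (words.take 5))
    if short_title = "" then "Nova Conversa" else short_title

-- ===== PORT B =====
-- B's for-loop over characters breaking at the first separator is List.takeWhile;
-- `ch in ".?!;:"` (one char against a string) is exactly membership in its char list.
def generate_chat_title_alt (user_prompt : String) : String :=
  let first_line := ((PySem.Str.split? (PySem.Str.strip user_prompt) "\n").getD []).headD ""
  let kept := first_line.toList.takeWhile (fun ch => !(['.', '?', '!', ';', ':'].contains ch))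
  let words := PySem.Str.split₀ (PySem.Str.replace (String.ofList kept) "," " ")
  let title := PySem.Str.join " " (words.take 5)
  if title = "" then "Nova Conversa" else title

-- ===== PRECONDITION & SPEC =====
def Spec_generate_chat_title (user_prompt : String) (out : String) : Prop := out = generate_chat_title_alt user_prompt
instance (user_prompt : String) (out : String) : Decidable (Spec_generate_chat_title user_prompt out) := by unfold Spec_generate_chat_title; infer_instance

-- ===== CLAIM (what is proved, stated in full; the proofs are below) =====
def Claim_equal_generate_chat_title : Prop := ∀ (user_prompt : String), Dom_generate_chat_title user_prompt → Spec_generate_chat_title user_prompt (generate_chat_title user_prompt)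

-- ===== LEMMAS AND PROOFS =====

-- head of splitOn.go with a non-empty accumulator is the first piece already pushed
theorem splitOn_go_headD_acc (sep : List Char) (fuel : Nat) :
    ∀ (l cur : List Char) (acc : List (List Char)) (a : List Char),
      (PySem.Chars.splitOn.go sep fuel l cur (acc ++ [a])).headD [] = a := by
  induction fuel with
  | zero => intro l cur acc a; simp [PySem.Chars.splitOn.go]
  | succ n ih =>
    intro l cur acc a
    cases l with
    | nil => simp [PySem.Chars.splitOn.go]
    | cons c rest =>
      rw [PySem.Chars.splitOn.go]
      split
      · have := ih (List.drop sep.length (c :: rest)) [] (cur.reverse :: acc) a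
        simpa using this
      · exact ih rest (c :: cur) acc a

-- head of split on a single-character separator = takeWhile (≠ c)
theorem splitOn_go_headD (c : Char) (fuel : Nat) :
    ∀ (l cur : List Char), l.length < fuel →
      (PySem.Chars.splitOn.go [c] fuel l cur []).headD []
        = cur.reverse ++ l.takeWhile (fun x => x != c) := by
  induction fuel with
  | zero => intro l cur h; omega
  | succ n ih =>
    intro l cur h
    cases l with
    | nil => simp [PySem.Chars.splitOn.go]
    | cons d rest =>
      rw [PySem.Chars.splitOn.go]
      split
      · rename_i hp
        have hcd : c = d := by simpa [List.isPrefixOf] using hp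
        have hone : ([c] : List Char).length = 1 := rfl
        rw [hone]
        have := splitOn_go_headD_acc [c] n (List.drop 1 (d :: rest)) [] [] cur.reverse
        simp only [List.nil_append] at this
        rw [this]
        subst hcd
        simp [List.takeWhile]
      · rename_i hp
        have hcd : ¬ (c = d) := by simpa [List.isPrefixOf] using hp
        have hlen : rest.length < n := by simpa using h
        rw [ih rest (d :: cur) hlen]
        have hdc : (d != c) = true := by simp [Ne.symm hcd]
        simp [List.takeWhile, hdc]

theorem splitOn_headD (l : List Char) (c : Char) :
    (PySem.Chars.splitOn l [c]).headD [] = l.takeWhile (fun x => x != c) := by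
  have := splitOn_go_headD c (l.length + 1) l [] (by omega)
  simpa [PySem.Chars.splitOn] using this

theorem headD_map_ofList (L : List (List Char)) :
    (L.map String.ofList).headD "" = String.ofList (L.headD []) := by
  cases L <;> simp

theorem pyHeadSplit_toList (s sep : String) (c : Char) (h : sep.toList = [c]) :
    (pyHeadSplit s sep).toList = s.toList.takeWhile (fun x => x != c) := by
  unfold pyHeadSplit
  rw [PySem.Str.split?, h]
  simp only [PySem.Chars.split?, List.isEmpty_cons, Option.map_some, Option.getD_some,
    if_false, Bool.false_eq_true]
  rw [headD_map_ofList, String.toList_ofList, splitOn_headD]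

-- every word produced by split₀ is non-empty and whitespace-free
theorem split₀_go_good : ∀ (l cur : List Char) (acc : List (List Char)),
    (∀ w ∈ acc, w ≠ [] ∧ ∀ ch ∈ w, PySem.Chars.isspace ch = false) →
    (∀ ch ∈ cur, PySem.Chars.isspace ch = false) →
    ∀ w ∈ PySem.Chars.split₀.go l cur acc, w ≠ [] ∧ ∀ ch ∈ w, PySem.Chars.isspace ch = false := by
  intro l
  induction l with
  | nil =>
    intro cur acc hacc hcur
    rw [PySem.Chars.split₀.go]
    split
    · simpa using hacc
    · rename_i hne
      intro w hw
      rw [List.mem_reverse] at hw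
      rcases List.mem_cons.mp hw with h1 | h2
      · subst h1
        exact ⟨by simpa using hne, fun ch hch => hcur ch (by simpa using hch)⟩
      · exact hacc _ h2
  | cons c rest ih =>
    intro cur acc hacc hcur
    rw [PySem.Chars.split₀.go]
    split
    · split
      · exact ih [] acc hacc (by simp)
      · rename_i hsp hne
        refine ih [] (cur.reverse :: acc) ?_ (by simp)
        intro w hw
        rcases List.mem_cons.mp hw with h1 | h2
        · subst h1
          exact ⟨by simpa using hne, fun ch hch => hcur ch (by simpa using hch)⟩
        · exact hacc _ h2
    · rename_i hsp
      refine ih (c :: cur) acc hacc ?_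
      intro ch hch
      rcases List.mem_cons.mp hch with h1 | h2
      · subst h1; simpa using hsp
      · exact hcur ch h2

theorem split₀_good (l : List Char) :
    ∀ w ∈ PySem.Chars.split₀ l, w ≠ [] ∧ ∀ ch ∈ w, PySem.Chars.isspace ch = false :=
  split₀_go_good l [] [] (by simp) (by simp)

-- strip is a no-op on a list whose first and last characters are not whitespace
theorem strip_noop (l : List Char)
    (hh : ∀ a, l.head? = some a → PySem.Chars.isspace a = false)
    (hl : ∀ b, l.getLast? = some b → PySem.Chars.isspace b = false) :
    PySem.Chars.strip l = l := by
  unfold PySem.Chars.strip PySem.Chars.lstrip PySem.Chars.rstrip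
  have h1 : List.dropWhile PySem.Chars.isspace l = l := by
    cases l with
    | nil => rfl
    | cons a t => simp [hh a rfl]
  rw [h1]
  cases l with
  | nil => rfl
  | cons a t =>
    cases hrev : (a :: t).reverse with
    | nil => simp at hrev
    | cons b u =>
      have hbl : (a :: t).getLast? = some b := by
        rw [List.getLast?_eq_head?_reverse, hrev]; rfl
      have hbs := hl b hbl
      rw [List.dropWhile_cons, hbs]
      simp only [Bool.false_eq_true, if_false]
      have := congrArg List.reverse hrev
      simpa using this.symm

-- head and last character of " ".join of non-empty whitespace-free words
theorem join_good : ∀ (ws : List (List Char)), ws ≠ [] →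
    (∀ w ∈ ws, w ≠ [] ∧ ∀ ch ∈ w, PySem.Chars.isspace ch = false) →
    PySem.Chars.join [' '] ws ≠ [] ∧
    (∀ a, (PySem.Chars.join [' '] ws).head? = some a → PySem.Chars.isspace a = false) ∧
    (∀ b, (PySem.Chars.join [' '] ws).getLast? = some b → PySem.Chars.isspace b = false) := by
  intro ws
  induction ws with
  | nil => intro h; exact absurd rfl h
  | cons w rest ih =>
    intro _ hgood
    cases rest with
    | nil =>
      have hw := hgood w (by simp)
      rw [PySem.Chars.join_singleton]
      refine ⟨hw.1, ?_, ?_⟩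
      · intro a ha
        exact hw.2 a (List.mem_of_mem_head? ha)
      · intro b hb
        exact hw.2 b (List.mem_of_getLast? hb)
    | cons v rest' =>
      have hw := hgood w (by simp)
      have hih := ih (by simp) (fun u hu => hgood u (by simp [hu]))
      rw [PySem.Chars.join_cons_cons]
      refine ⟨by simp [hw.1], ?_, ?_⟩
      · intro a ha
        cases w with
        | nil => exact absurd rfl hw.1
        | cons x xs =>
          simp at ha
          exact hw.2 a (by simp [← ha])
      · intro b hb
        rw [List.getLast?_append_of_ne_nil _ hih.1] at hb
        exact hih.2.2 b hb

-- the five successive takeWhile passes equal one pass with the combined predicate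
theorem takeWhile_chain (l : List Char) :
    ((((l.takeWhile (fun x => x != '.')).takeWhile (fun x => x != '?')).takeWhile
        (fun x => x != '!')).takeWhile (fun x => x != ';')).takeWhile (fun x => x != ':')
      = l.takeWhile (fun ch => !(['.', '?', '!', ';', ':'].contains ch)) := by
  simp only [List.takeWhile_takeWhile]
  congr 1
  funext x
  simp only [List.contains_cons, List.contains_nil, Bool.or_false, Bool.not_or, bne]
  by_cases h1 : x = '.' <;> by_cases h2 : x = '?' <;> by_cases h3 : x = '!' <;>
    by_cases h4 : x = ';' <;> by_cases h5 : x = ':' <;> simp [h1, h2, h3, h4, h5]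

-- ===== VERDICT (by name: the statement is the Claim_ definition above) =====
theorem generate_chat_title_spec : Claim_equal_generate_chat_title := by
  intro user_prompt _
  simp only [Spec_generate_chat_title, generate_chat_title, generate_chat_title_alt]
  -- the shared first line
  set F : String := ((PySem.Str.split? (PySem.Str.strip user_prompt) "\n").getD []).headD "" with hF
  have hF0 : pyHeadSplit (PySem.Str.strip user_prompt) "\n" = F := rfl
  rw [hF0]
  -- A's five passes and B's single scan cut the same prefix
  have hfs : (([".", "?", "!", ";", ":"] : List String).foldl (fun s sep => pyHeadSplit s sep) F).toList
      = F.toList.takeWhile (fun ch => !(['.', '?', '!', ';', ':'].contains ch)) := by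
    simp only [List.foldl_cons, List.foldl_nil]
    rw [pyHeadSplit_toList _ ":" ':' rfl, pyHeadSplit_toList _ ";" ';' rfl,
      pyHeadSplit_toList _ "!" '!' rfl, pyHeadSplit_toList _ "?" '?' rfl,
      pyHeadSplit_toList _ "." '.' rfl]
    exact takeWhile_chain F.toList
  -- hence the two strings fed to replace/split are equal
  have hsent : ([".", "?", "!", ";", ":"] : List String).foldl (fun s sep => pyHeadSplit s sep) F
      = String.ofList (F.toList.takeWhile (fun ch => !(['.', '?', '!', ';', ':'].contains ch))) := by
    apply String.toList_inj.mp
    rw [hfs, String.toList_ofList]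
  rw [hsent]
  set X : String := PySem.Str.replace (String.ofList (F.toList.takeWhile (fun ch => !(['.', '?', '!', ';', ':'].contains ch)))) "," " " with hX
  -- A's filter keeps every word
  have hgood : ∀ w ∈ PySem.Str.split₀ X, w ≠ "" ∧ ∀ ch ∈ w.toList, PySem.Chars.isspace ch = false := by
    intro w hw
    have hmem : w.toList ∈ PySem.Chars.split₀ X.toList := by
      rw [← PySem.Str.split₀_map_toList]
      exact List.mem_map_of_mem hw
    have := split₀_good X.toList w.toList hmem
    refine ⟨?_, this.2⟩
    intro hc
    exact this.1 (by simp [hc])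
  have hfilter : (PySem.Str.split₀ X).filter (fun w => w != "") = PySem.Str.split₀ X := by
    apply List.filter_eq_self.mpr
    intro w hw
    simpa using (hgood w hw).1
  rw [hfilter]
  -- case split on whether there are any words
  cases hws : PySem.Str.split₀ X with
  | nil =>
    have hjoin : PySem.Str.join " " ([] : List String) = "" := by
      apply String.toList_inj.mp
      simp [PySem.Str.toList_join, PySem.Chars.join, List.intercalate]
    simp [hjoin]
  | cons w rest =>
    have hne : (w :: rest : List String) ≠ [] := by simp
    -- the words fed to join, at the character level
    have htake : ∀ u ∈ (w :: rest).take 5, u ∈ PySem.Str.split₀ X := by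
      intro u hu; rw [hws]; exact List.mem_of_mem_take hu
    have hj : (PySem.Str.join " " ((w :: rest).take 5)).toList
        = PySem.Chars.join [' '] (((w :: rest).take 5).map String.toList) := by
      rw [PySem.Str.toList_join]; rfl
    have hgood' : ∀ v ∈ ((w :: rest).take 5).map String.toList,
        v ≠ [] ∧ ∀ ch ∈ v, PySem.Chars.isspace ch = false := by
      intro v hv
      rcases List.mem_map.mp hv with ⟨u, hu, rfl⟩
      have := hgood u (htake u hu)
      exact ⟨fun hc => this.1 (String.toList_inj.mp (by simp [hc])), this.2⟩
    have hne' : ((w :: rest).take 5).map String.toList ≠ [] := by simp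
    have hjg := join_good (((w :: rest).take 5).map String.toList) hne' hgood'
    -- A's final strip is a no-op and the joined title is non-empty
    have hstrip : PySem.Str.strip (PySem.Str.join " " ((w :: rest).take 5))
        = PySem.Str.join " " ((w :: rest).take 5) := by
      apply String.toList_inj.mp
      rw [PySem.Str.toList_strip, hj]
      rw [strip_noop _ hjg.2.1 hjg.2.2]
    have hnonempty : PySem.Str.join " " ((w :: rest).take 5) ≠ "" := by
      intro hc
      apply hjg.1
      rw [← hj, hc]; rfl
    simp only [List.isEmpty_cons, Bool.false_eq_true, if_false, hstrip]
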